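-- pv_equiv track=rewrite | github.com/AdamZhouSE/pythonHomework | Code/CodeRecords/2788/60755/282333.py | solve
-- ===== SOURCE A (Python) =====
-- def solve(boy,girl,res):
--     if len(boy)==0 or len(girl)==0:
--         return res
--     if abs(boy[0]-girl[0])<=1:
--         return solve(boy[1:],girl[1:],res+1)
--     elif boy[0]<girl[0]:
--         return solve(boy[1:],girl,res)
--     else:
--         return solve(boy,girl[1:],res)
-- ===== SOURCE B (Python) =====
-- def solve(boy, girl, res):
--     n, m = len(boy), len(girl)
--     i = j = 0
--     cnt = 0
--     while i < n and j < m: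
--         if abs(boy[i] - girl[j]) <= 1:
--             cnt += 1
--             i += 1
--             j += 1
--         elif boy[i] < girl[j]:
--             i += 1
--         else:
--             j += 1
--     return res + cnt
-- ===== Notes on version B (the rewrite author's own statement) =====
-- stated objective: faster
-- what changed: Replaced A's recursion on list slices (each slice copies the tail, and Python recursion depth limits apply) with an iterative two-pointer index loop accumulating a counter.
import Mathlib
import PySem

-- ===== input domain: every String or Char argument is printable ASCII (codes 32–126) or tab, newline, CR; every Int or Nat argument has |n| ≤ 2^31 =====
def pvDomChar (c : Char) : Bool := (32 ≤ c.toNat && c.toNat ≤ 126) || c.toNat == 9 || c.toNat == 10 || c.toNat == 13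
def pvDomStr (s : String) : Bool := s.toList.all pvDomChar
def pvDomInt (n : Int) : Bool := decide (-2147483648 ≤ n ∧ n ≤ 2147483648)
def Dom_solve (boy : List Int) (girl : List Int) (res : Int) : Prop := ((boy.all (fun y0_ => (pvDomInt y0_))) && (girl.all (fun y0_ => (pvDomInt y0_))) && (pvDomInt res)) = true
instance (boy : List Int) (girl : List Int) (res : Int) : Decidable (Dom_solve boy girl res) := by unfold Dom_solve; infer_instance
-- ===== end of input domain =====

-- B replaces A's recursion on list slices with an iterative two-pointer index loop; objective: faster (no per-step slice copies).

-- ===== PORT A =====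
-- literal port of A: recursion on the two lists, slicing becomes taking the tail
def solve (boy : List Int) (girl : List Int) (res : Int) : Int :=
  match boy, girl with
  | [], _ => res
  | _, [] => res
  | b :: bs, g :: gs =>
    if |b - g| ≤ 1 then solve bs gs (res + 1)
    else if b < g then solve bs (g :: gs) res
    else solve (b :: bs) gs res
termination_by boy.length + girl.length
decreasing_by all_goals (simp only [List.length_cons]; omega)

-- ===== PORT B =====
-- the while loop of Source B; boy[i]/girl[j] are only read with i < n = |boy|, j < m = |girl|,
-- so getD is exact there (no negative or out-of-range index ever occurs)
def solveLoop (boy : List Int) (girl : List Int) (n m : Nat) (i j : Nat) (cnt : Int) : Int :=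
  if i < n ∧ j < m then
    if |boy.getD i 0 - girl.getD j 0| ≤ 1 then solveLoop boy girl n m (i+1) (j+1) (cnt+1)
    else if boy.getD i 0 < girl.getD j 0 then solveLoop boy girl n m (i+1) j cnt
    else solveLoop boy girl n m i (j+1) cnt
  else cnt
termination_by (n - i) + (m - j)
decreasing_by all_goals omega

def solve_alt (boy : List Int) (girl : List Int) (res : Int) : Int :=
  res + solveLoop boy girl boy.length girl.length 0 0 0

-- ===== PRECONDITION & SPEC =====
def Spec_solve (boy : List Int) (girl : List Int) (res : Int) (out : Int) : Prop := out = solve_alt boy girl res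
instance (boy : List Int) (girl : List Int) (res : Int) (out : Int) : Decidable (Spec_solve boy girl res out) := by unfold Spec_solve; infer_instance

-- ===== CLAIM (what is proved, stated in full; the proofs are below) =====
def Claim_equal_solve : Prop := ∀ (boy : List Int) (girl : List Int) (res : Int), Dom_solve boy girl res → Spec_solve boy girl res (solve boy girl res)

-- ===== LEMMAS AND PROOFS =====

-- A's accumulator can be pulled out front
lemma solve_acc : ∀ (k : Nat) (boy girl : List Int), boy.length + girl.length ≤ k →
    ∀ res : Int, solve boy girl res = res + solve boy girl 0 := by
  intro k
  induction k with
  | zero =>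
    intro boy girl h res
    match boy, girl with
    | [], _ => simp [solve]
    | _ :: _, _ => simp at h
  | succ n ih =>
    intro boy girl h res
    match boy, girl with
    | [], _ => simp [solve]
    | _ :: _, [] => simp [solve]
    | b :: bs, g :: gs =>
      simp only [List.length_cons] at h
      rw [solve, solve]
      split
      · rw [ih bs gs (by omega) (res + 1), ih bs gs (by omega) (0 + 1)]
        omega
      · split
        · rw [ih bs (g :: gs) (by simp; omega) res]
        · rw [ih (b :: bs) gs (by simp; omega) res]

-- B's index loop computes A's recursion on the corresponding suffixes
lemma loop_eq : ∀ (k : Nat) (boy girl : List Int) (i j : Nat) (cnt : Int),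
    (boy.length - i) + (girl.length - j) ≤ k →
    solveLoop boy girl boy.length girl.length i j cnt = solve (boy.drop i) (girl.drop j) cnt := by
  intro k
  induction k with
  | zero =>
    intro boy girl i j cnt h
    rw [solveLoop]
    have hi : ¬ (i < boy.length ∧ j < girl.length) := by omega
    rw [if_neg hi]
    have : boy.drop i = [] := List.drop_eq_nil_of_le (by omega)
    rw [this, solve]
  | succ n ih =>
    intro boy girl i j cnt h
    rw [solveLoop]
    by_cases hc : i < boy.length ∧ j < girl.length
    · obtain ⟨hi, hj⟩ := hc
      rw [if_pos ⟨hi, hj⟩]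
      have hb : boy.drop i = boy[i] :: boy.drop (i+1) := List.drop_eq_getElem_cons hi
      have hg : girl.drop j = girl[j] :: girl.drop (j+1) := List.drop_eq_getElem_cons hj
      have hbg : boy.getD i 0 = boy[i] := List.getD_eq_getElem boy 0 hi
      have hgg : girl.getD j 0 = girl[j] := List.getD_eq_getElem girl 0 hj
      rw [hb, hg, solve, hbg, hgg]
      split
      · rw [ih boy girl (i+1) (j+1) (cnt+1) (by omega)]
      · split
        · rw [ih boy girl (i+1) j cnt (by omega), hg]
        · rw [ih boy girl i (j+1) cnt (by omega), hb]
    · rw [if_neg hc]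
      rcases (by omega : boy.length ≤ i ∨ girl.length ≤ j) with h' | h'
      · rw [List.drop_eq_nil_of_le h', solve]
      · rw [List.drop_eq_nil_of_le h']
        cases boy.drop i with
        | nil => rw [solve]
        | cons a l => rw [solve] <;> simp

-- ===== VERDICT (by name: the statement is the Claim_ definition above) =====
theorem solve_spec : Claim_equal_solve := by
  intro boy girl res _
  unfold Spec_solve solve_alt
  rw [loop_eq (boy.length + girl.length) boy girl 0 0 0 (by omega)]
  simp only [List.drop_zero]
  exact solve_acc (boy.length + girl.length) boy girl (le_refl _) res
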